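-- pv_equiv track=rewrite | github.com/DavideCarletto/PythonProjects | Prove_d'esame/Discografia/Discografia.py | crea_tabella_artisti
-- ===== SOURCE A (Python) =====
-- import operator
--
-- def crea_tabella_artisti(lista_artisti):
--     artisti = dict()
--     for artista in lista_artisti:
--         for(chiave, valore) in artista.items():
--             if(chiave!= "codice"):
--                 if (valore not in artisti):
--                     artisti[valore] = []
--
--                 artisti[valore].append((chiave,artista.get("codice")))
--
--     artisti_ordinati = dict(sorted(artisti.items(),key= operator.itemgetter(0)))
--     return artisti_ordinati
-- ===== SOURCE B (Python) =====
-- import operator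
--
-- def crea_tabella_artisti(lista_artisti):
--     flat = [(valore, (chiave, artista.get("codice")))
--             for artista in lista_artisti
--             for chiave, valore in artista.items()
--             if chiave != "codice"]
--     flat.sort(key=operator.itemgetter(0))      # stable sort by valore only
--     risultato = {}
--     i = 0
--     n = len(flat)
--     while i < n:
--         valore = flat[i][0]
--         gruppo = []
--         while i < n and flat[i][0] == valore:
--             gruppo.append(flat[i][1])
--             i += 1
--         risultato[valore] = gruppo
--     return risultato
-- ===== Notes on version B (the rewrite author's own statement) =====
-- stated objective: alternative
-- what changed: B replaces A's incremental dict-of-buckets (membership test + append per item, then sort the dict items) by flatten / stable-sort-by-value / one grouping scan over consecutive runs (sort-then-groupby), with no bucket dict.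
-- outside the precondition, e.g. on crea_tabella_artisti([{'nome': 'Mina'}]): A returns {'Mina': [('nome', None)]}, B returns {'Mina': [('nome', None)]}
import Mathlib
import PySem

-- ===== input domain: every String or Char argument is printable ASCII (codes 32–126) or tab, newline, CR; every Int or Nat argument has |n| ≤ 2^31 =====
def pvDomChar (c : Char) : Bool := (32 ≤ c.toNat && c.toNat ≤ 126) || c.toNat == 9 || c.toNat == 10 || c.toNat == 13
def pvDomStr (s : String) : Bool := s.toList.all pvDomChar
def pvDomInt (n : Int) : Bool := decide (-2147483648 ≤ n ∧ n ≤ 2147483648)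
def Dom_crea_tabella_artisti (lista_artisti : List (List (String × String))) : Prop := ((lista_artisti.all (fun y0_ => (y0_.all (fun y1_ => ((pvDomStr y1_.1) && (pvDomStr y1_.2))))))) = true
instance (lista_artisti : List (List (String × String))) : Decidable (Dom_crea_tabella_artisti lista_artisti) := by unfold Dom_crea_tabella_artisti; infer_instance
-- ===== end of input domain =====

-- B replaces A's incremental dict-bucketing-then-sort by: flatten to (valore, (chiave, codice)) triples,
-- stable-sort them by valore, and scan the sorted list once, grouping consecutive runs (sort-then-groupby).


-- ===== PORT A =====
-- Transliteration of A: build the bucket dict incrementally over the two nested loops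
-- (each Python dict `artista` is PySem.Dict.ofList of its pairs), then dict(sorted(artisti.items(), key=itemgetter(0))).
-- `artista.get("codice")` is ported as `getD "codice" ""`: Pre_ guarantees the key is present, so the default is never used.
def crea_tabella_artisti (lista_artisti : List (List (String × String))) : List (String × List (String × String)) :=
  let artisti : PySem.Dict String (List (String × String)) :=
    lista_artisti.foldl (fun artisti artista =>
      let d := PySem.Dict.ofList artista
      d.items.foldl (fun acc kv =>
        if kv.1 ≠ "codice" then
          let acc' := if acc.contains kv.2 then acc else acc.insert kv.2 []
          acc'.insert kv.2 (acc'.getD kv.2 [] ++ [(kv.1, d.getD "codice" "")])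
        else acc) artisti) PySem.Dict.empty
  (PySem.Dict.ofList (PySem.List.sorted artisti.items (fun p => p.1) false)).items

-- ===== PORT B =====
-- B-side helper: the inner while-loop of B (collect the run of consecutive triples with the same valore,
-- then continue after it) — ported as first element + takeWhile / dropWhile of the rest (exact: the run
-- is the maximal constant-key prefix).
def pvGroups : List (String × String × String) → List (String × List (String × String))
  | [] => []
  | t :: rest =>
      (t.1, t.2 :: (rest.takeWhile (fun u => u.1 == t.1)).map (fun u => u.2)) ::
      pvGroups (rest.dropWhile (fun u => u.1 == t.1))
termination_by l => l.length
decreasing_by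
  simp only [List.length_cons]
  exact Nat.lt_succ_of_le (List.length_dropWhile_le _ _)

-- Transliteration of B: flat list of (valore, (chiave, codice)), stable sort by valore, one grouping scan.
def crea_tabella_artisti_alt (lista_artisti : List (List (String × String))) : List (String × List (String × String)) :=
  let flat : List (String × String × String) :=
    lista_artisti.flatMap (fun artista =>
      let d := PySem.Dict.ofList artista
      (d.items.filter (fun kv => kv.1 ≠ "codice")).map (fun kv => (kv.2, (kv.1, d.getD "codice" ""))))
  (PySem.Dict.ofList (pvGroups (PySem.List.sorted flat (fun t => t.1) false))).items

-- ===== PRECONDITION & SPEC =====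
-- Pre_ excludes artisti records without a "codice" key: there Python A returns tuples containing None,
-- which is not a value of the declared type List (String × List (String × String)).
def Pre_crea_tabella_artisti (lista_artisti : List (List (String × String))) : Prop :=
  (lista_artisti.all (fun artista => artista.any (fun p => p.1 == "codice"))) = true
instance (lista_artisti : List (List (String × String))) : Decidable (Pre_crea_tabella_artisti lista_artisti) := by unfold Pre_crea_tabella_artisti; infer_instance

def pvWitness_crea_tabella_artisti : (List (List (String × String))) :=
  [[("codice", "7"), ("nome", "Mina"), ("genere", "pop")], [("codice", "9"), ("genere", "pop")]]

def Spec_crea_tabella_artisti (lista_artisti : List (List (String × String))) (out : List (String × List (String × String))) : Prop := out = crea_tabella_artisti_alt lista_artisti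
instance (lista_artisti : List (List (String × String))) (out : List (String × List (String × String))) : Decidable (Spec_crea_tabella_artisti lista_artisti out) := by unfold Spec_crea_tabella_artisti; infer_instance

-- ===== CLAIM (what is proved, stated in full; the proofs are below) =====
def Claim_equal_crea_tabella_artisti : Prop := ∀ (lista_artisti : List (List (String × String))), Dom_crea_tabella_artisti lista_artisti → Pre_crea_tabella_artisti lista_artisti → Spec_crea_tabella_artisti lista_artisti (crea_tabella_artisti lista_artisti)

-- ===== LEMMAS AND PROOFS =====

-- A's loop body, as a step over one flat triple (valore, (chiave, codice)).
def pvStepA (acc : PySem.Dict String (List (String × String))) (t : String × String × String) :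
    PySem.Dict String (List (String × String)) :=
  let acc' := if acc.contains t.1 then acc else acc.insert t.1 []
  acc'.insert t.1 (acc'.getD t.1 [] ++ [t.2])

-- the group of one valore, read off the flat list
def pvGroup (flat : List (String × String × String)) (v : String) : List (String × String) :=
  (flat.filter (fun t => t.1 == v)).map (fun t => t.2)

-- the flat triple list both programs traverse
def pvFlat (lista_artisti : List (List (String × String))) : List (String × String × String) :=
  lista_artisti.flatMap (fun artista =>
    let d := PySem.Dict.ofList artista
    (d.items.filter (fun kv => kv.1 ≠ "codice")).map (fun kv => (kv.2, (kv.1, d.getD "codice" ""))))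

lemma pvGroup_append_singleton (l : List (String × String × String)) (t : String × String × String) (v : String) :
    pvGroup (l ++ [t]) v = pvGroup l v ++ (if t.1 == v then [t.2] else []) := by
  simp only [pvGroup, List.filter_append, List.map_append]
  by_cases h : t.1 = v <;> simp [h]

-- invariant of A's bucket loop: the dict's items are exactly the first-occurrence-ordered
-- distinct valori, each paired with its filter-group of the flat list
lemma pvBucket_items (flat : List (String × String × String)) :
    (flat.foldl pvStepA PySem.Dict.empty).items
      = (PySem.Set.ofList (flat.map (fun t => t.1))).map (fun v => (v, pvGroup flat v)) := by
  induction flat using List.reverseRecOn with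
  | nil => simp [PySem.Set.ofList, pvGroup]; rfl
  | append_singleton l t ih =>
    rw [List.foldl_append, List.foldl_cons, List.foldl_nil]
    set d := l.foldl pvStepA PySem.Dict.empty with hd
    have hkeys : d.keys = PySem.Set.ofList (l.map (fun t => t.1)) := by
      simp only [PySem.Dict.keys, ih, List.map_map]
      exact List.map_id' _
    have hnodup : d.keys.Nodup := by rw [hkeys]; exact PySem.Set.nodup_ofList _
    simp only [List.map_append, List.map_cons, List.map_nil]
    rw [PySem.Set.ofList_append_singleton]
    by_cases hv : t.1 ∈ PySem.Set.ofList (l.map (fun t => t.1))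
    · have hcont : d.contains t.1 = true := by
        rw [PySem.Dict.contains_iff_mem_keys, hkeys]; exact hv
      have hmem : (t.1, pvGroup l t.1) ∈ d.items := by
        rw [ih]; exact List.mem_map_of_mem hv
      have hgetD : d.getD t.1 [] = pvGroup l t.1 :=
        PySem.Dict.getD_of_mem_items d hmem hnodup []
      simp only [pvStepA, hcont, if_true]
      rw [PySem.Dict.items_insert_of_contains d _ hcont, PySem.Set.add_of_mem hv, hgetD, ih,
        List.map_map]
      refine List.map_congr_left (fun v hvmem => ?_)
      by_cases hveq : v = t.1
      · subst hveq; simp [pvGroup_append_singleton]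
      · have : (v == t.1) = false := by simp [hveq]
        simp only [Function.comp, this, Bool.false_eq_true, if_false,
          pvGroup_append_singleton]
        have h2 : (t.1 == v) = false := by
          simp only [beq_eq_false_iff_ne, Ne]; exact fun h => hveq h.symm
        simp [h2]
    · have hcont : d.contains t.1 = false := by
        rw [Bool.eq_false_iff, Ne, PySem.Dict.contains_iff_mem_keys, hkeys]; exact hv
      have hgl : pvGroup l t.1 = [] := by
        rw [PySem.Set.mem_ofList] at hv
        simp only [pvGroup, List.map_eq_nil_iff, List.filter_eq_nil_iff]
        intro a ha hba
        exact hv (by rw [← (by simpa using hba : a.1 = t.1)]; exact List.mem_map_of_mem ha)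
      simp only [pvStepA, hcont, Bool.false_eq_true, if_false]
      rw [PySem.Dict.getD_insert_self, PySem.Dict.insert_insert_self,
        PySem.Dict.items_insert_of_not_contains d _ hcont, PySem.Set.add_of_not_mem hv,
        List.map_append, ih]
      congr 1
      · refine List.map_congr_left (fun v hvmem => ?_)
        have hne : (t.1 == v) = false := by
          simp only [beq_eq_false_iff_ne, Ne]; intro h; exact hv (h ▸ hvmem)
        rw [pvGroup_append_singleton, hne]; simp
      · simp [pvGroup_append_singleton, hgl, List.nil_append]

-- sorting the bucket items by key and re-wrapping them in a dict yields the sorted distinct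
-- valori, each with its group
lemma pvMain (flat : List (String × String × String)) :
    (PySem.Dict.ofList (PySem.List.sorted (flat.foldl pvStepA PySem.Dict.empty).items (fun p => p.1) false)).items
      = (PySem.List.sorted (PySem.Set.ofList (flat.map (fun t => t.1))) (fun v => v) false).map
          (fun v => (v, pvGroup flat v)) := by
  rw [pvBucket_items]
  have hpw : ((PySem.List.sorted (PySem.Set.ofList (flat.map (fun t => t.1))) (fun v => v) false).map
      (fun v => (v, pvGroup flat v))).Pairwise (fun a b => a.1 < b.1) := by
    rw [List.pairwise_map]
    exact PySem.List.sorted_ofList_pairwise_lt _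
  have hs : PySem.List.sorted
      ((PySem.Set.ofList (flat.map (fun t => t.1))).map (fun v => (v, pvGroup flat v))) (fun p => p.1) false
      = (PySem.List.sorted (PySem.Set.ofList (flat.map (fun t => t.1))) (fun v => v) false).map
          (fun v => (v, pvGroup flat v)) :=
    PySem.List.sorted_eq_of_perm_of_pairwise_lt _ _ _
      ((PySem.List.sorted_perm _ _ false).map _) hpw
  rw [hs]
  have hnodupL : (((PySem.List.sorted (PySem.Set.ofList (flat.map (fun t => t.1))) (fun v => v) false).map
      (fun v => (v, pvGroup flat v))).map (fun p => p.1)).Nodup := by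
    rw [List.map_map]
    simp only [List.Nodup, List.pairwise_map]
    exact (PySem.List.sorted_ofList_pairwise_lt (flat.map (fun t => t.1))).imp (fun h => ne_of_lt h)
  have := PySem.Dict.items_foldl_insert_fresh
    ((PySem.List.sorted (PySem.Set.ofList (flat.map (fun t => t.1))) (fun v => v) false).map
      (fun v => (v, pvGroup flat v)))
    (fun p => p.1) (fun p => p.2) PySem.Dict.empty
    (fun a _ => by simp) hnodupL
  simpa using this

-- A's nested loops are the fold of pvStepA over the flat triple list
lemma pvFoldA (lista_artisti : List (List (String × String))) :
    lista_artisti.foldl (fun artisti artista =>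
      let d := PySem.Dict.ofList artista
      d.items.foldl (fun acc kv =>
        if kv.1 ≠ "codice" then
          let acc' := if acc.contains kv.2 then acc else acc.insert kv.2 []
          acc'.insert kv.2 (acc'.getD kv.2 [] ++ [(kv.1, d.getD "codice" "")])
        else acc) artisti) PySem.Dict.empty
    = (pvFlat lista_artisti).foldl pvStepA PySem.Dict.empty := by
  rw [pvFlat, List.foldl_flatMap]
  congr 1
  funext acc artista
  rw [List.foldl_map, List.foldl_filter]
  simp only []
  congr 1
  funext acc kv
  by_cases h : kv.1 = "codice" <;> simp [h, pvStepA]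

lemma pvInsertBy_filter (v : String) (x : String × String × String)
    (acc : List (String × String × String)) (hs : acc.Pairwise (fun a b => a.1 ≤ b.1)) :
    (PySem.List.insertBy (fun a b => decide (a.1 < b.1)) x acc).filter (fun t => t.1 == v)
      = acc.filter (fun t => t.1 == v) ++ (if x.1 == v then [x] else []) := by
  induction acc with
  | nil => by_cases h : x.1 = v <;> simp [PySem.List.insertBy, h]
  | cons y ys ih =>
    show (if decide (x.1 < y.1) = true then x :: y :: ys
          else y :: PySem.List.insertBy (fun a b => decide (a.1 < b.1)) x ys).filter (fun t => t.1 == v) = _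
    by_cases hlt : x.1 < y.1
    · simp only [hlt, decide_true, if_true]
      by_cases hxv : x.1 = v
      · -- no element of y :: ys can have key v = x.1 < every key there
        have hnone : ∀ t ∈ (y :: ys), (t.1 == v) = false := by
          intro t ht
          have hyt : y.1 ≤ t.1 := by
            rcases List.mem_cons.mp ht with h | h
            · exact h ▸ le_refl _
            · exact (List.pairwise_cons.mp hs).1 t h
          have : v < t.1 := lt_of_lt_of_le (hxv ▸ hlt) hyt
          refine beq_eq_false_iff_ne.mpr ?_
          intro he; rw [he] at this; exact lt_irrefl _ this
        have hnone' : ∀ t ∈ (y :: ys), ¬ ((t.1 == v) = true) := by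
          intro t ht; rw [hnone t ht]; simp
        rw [List.filter_cons, List.filter_eq_nil_iff.mpr hnone']
        have hys : ys.filter (fun t => t.1 == v) = [] :=
          List.filter_eq_nil_iff.mpr (fun t ht => hnone' t (List.mem_cons_of_mem _ ht))
        simp [hxv]
      · have hx : (x.1 == v) = false := by simpa using hxv
        simp [List.filter_cons, hx]
    · simp only [hlt, decide_false, Bool.false_eq_true, if_false]
      rw [List.filter_cons, List.filter_cons, ih (List.pairwise_cons.mp hs).2]
      by_cases hyv : y.1 = v <;> simp [hyv]

lemma pvFilter_sorted (flat : List (String × String × String)) (v : String) :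
    (PySem.List.sorted flat (fun t => t.1) false).filter (fun t => t.1 == v)
      = flat.filter (fun t => t.1 == v) := by
  induction flat using List.reverseRecOn with
  | nil => rfl
  | append_singleton l x ih =>
    have h1 : PySem.List.sorted (l ++ [x]) (fun t => t.1) false
        = PySem.List.insertBy (fun a b => decide (a.1 < b.1)) x
            (PySem.List.sorted l (fun t => t.1) false) := by
      rw [PySem.List.sorted_eq_foldl_insertBy, PySem.List.sorted_eq_foldl_insertBy,
        List.foldl_append, List.foldl_cons, List.foldl_nil]
    rw [h1, pvInsertBy_filter v x _ (PySem.List.sorted_pairwise l (fun t => t.1)), ih,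
      List.filter_append]
    by_cases h : x.1 = v <;> simp [h]

lemma pvOfList_sublist {α : Type} [BEq α] [LawfulBEq α] (l : List α) :
    (PySem.Set.ofList l).Sublist l := by
  induction l using List.reverseRecOn with
  | nil => simp [PySem.Set.ofList]
  | append_singleton l x ih =>
    rw [PySem.Set.ofList_append_singleton]
    by_cases h : x ∈ PySem.Set.ofList l
    · rw [PySem.Set.add_of_mem h]
      exact ih.trans (List.sublist_append_left l [x])
    · rw [PySem.Set.add_of_not_mem h]
      exact List.Sublist.append ih (List.Sublist.refl _)

lemma pvDiscard_ofList (v : String) (gk rk : List String) (hg : ∀ y ∈ gk, y = v) (hr : v ∉ PySem.Set.ofList rk) :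
    PySem.Set.discard (PySem.Set.ofList (gk ++ rk)) v = PySem.Set.ofList rk := by
  induction gk with
  | nil =>
    simp only [List.nil_append, PySem.Set.discard]
    refine List.filter_eq_self.mpr (fun a ha => ?_)
    simp only [Bool.not_eq_eq_eq_not, Bool.not_true, beq_eq_false_iff_ne, Ne]
    intro he; exact hr (he ▸ ha)
  | cons y gk ih =>
    have hyv : y = v := hg y (by simp)
    subst hyv
    rw [List.cons_append, PySem.Set.ofList_cons]
    simp only [PySem.Set.discard, List.filter_cons, BEq.rfl, Bool.not_true, Bool.false_eq_true,
      if_false, List.filter_filter]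
    have hsame : ∀ p : String → Bool, List.filter (fun a => p a && p a) (PySem.Set.ofList (gk ++ rk))
        = List.filter p (PySem.Set.ofList (gk ++ rk)) := by
      intro p; congr 1; funext a; rw [Bool.and_self]
    rw [hsame]
    exact ih (fun z hz => hg z (by simp [hz]))

lemma pvGroups_eq : ∀ (n : Nat) (s : List (String × String × String)), s.length ≤ n →
    s.Pairwise (fun a b => a.1 ≤ b.1) →
    pvGroups s = (PySem.Set.ofList (s.map (fun t => t.1))).map
      (fun v => (v, (s.filter (fun t => t.1 == v)).map (fun t => t.2))) := by
  intro n
  induction n with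
  | zero =>
    intro s hlen _
    have : s = [] := List.eq_nil_of_length_eq_zero (Nat.le_zero.mp hlen)
    subst this; simp [pvGroups, PySem.Set.ofList]
  | succ n ihn =>
    intro s hlen hs
    match s, hs with
    | [], _ => simp [pvGroups, PySem.Set.ofList]
    | t :: rest, hs =>
      have hg : ∀ u ∈ rest.takeWhile (fun u => u.1 == t.1), u.1 = t.1 := by
        intro u hu
        simpa using List.mem_takeWhile_imp hu
      set g := rest.takeWhile (fun u => u.1 == t.1) with hgdef
      set r := rest.dropWhile (fun u => u.1 == t.1) with hrdef
      have hsplit : rest = g ++ r := (List.takeWhile_append_dropWhile).symm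
      have hrest_le : ∀ u ∈ rest, t.1 ≤ u.1 := fun u hu => (List.pairwise_cons.mp hs).1 u hu
      have hrpw : r.Pairwise (fun a b => a.1 ≤ b.1) :=
        ((hsplit ▸ (List.pairwise_cons.mp hs).2).sublist (List.sublist_append_right g r))
      have hrne : ∀ u ∈ r, (u.1 == t.1) = false := by
        intro u hu
        rcases hre : r with _ | ⟨r0, rt⟩
        · rw [hre] at hu; exact absurd hu (List.not_mem_nil)
        · have hr0 : (r0.1 == t.1) = false := by
            have := List.head_dropWhile_not (fun u => u.1 == t.1) (l := rest)
              (by rw [← hrdef, hre]; simp)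
            simpa [← hrdef, hre] using this
          have hr0gt : t.1 < r0.1 := by
            have hle : t.1 ≤ r0.1 := hrest_le r0 (by rw [hsplit, hre]; simp)
            rcases lt_or_eq_of_le hle with h | h
            · exact h
            · exact absurd h.symm (by simpa using hr0)
          rw [hre] at hu
          rcases List.mem_cons.mp hu with h | h
          · exact h ▸ hr0
          · have hle : r0.1 ≤ u.1 := (List.pairwise_cons.mp (hre ▸ hrpw)).1 u h
            refine beq_eq_false_iff_ne.mpr ?_
            intro he; rw [he] at hle
            exact absurd (lt_of_lt_of_le hr0gt hle) (lt_irrefl _)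
      have hnotmem : t.1 ∉ PySem.Set.ofList (r.map (fun u => u.1)) := by
        intro hmem
        rw [PySem.Set.mem_ofList] at hmem
        rcases List.mem_map.mp hmem with ⟨u, hu, he⟩
        have := hrne u hu
        rw [he] at this; simp at this
      have hkeys : PySem.Set.ofList ((t :: rest).map (fun u => u.1))
          = t.1 :: PySem.Set.ofList (r.map (fun u => u.1)) := by
        rw [List.map_cons, PySem.Set.ofList_cons, hsplit, List.map_append,
          pvDiscard_ofList t.1 _ _ (fun y hy => by
            rcases List.mem_map.mp hy with ⟨u, hu, he⟩
            exact he ▸ hg u hu) hnotmem]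
      have hfiltg : g.filter (fun u => u.1 == t.1) = g :=
        List.filter_eq_self.mpr (fun u hu => by simp [hg u hu])
      have hfiltr : r.filter (fun u => u.1 == t.1) = [] :=
        List.filter_eq_nil_iff.mpr (fun u hu => by rw [hrne u hu]; simp)
      have hlenr : r.length ≤ n := by
        have h1 : r.length ≤ rest.length := List.length_dropWhile_le _ _
        have h2 : rest.length + 1 ≤ n + 1 := by simpa using hlen
        omega
      have hstep : pvGroups (t :: rest)
          = (t.1, t.2 :: g.map (fun u => u.2)) :: pvGroups r := by
        rw [pvGroups]
      rw [hstep, hkeys, List.map_cons, ihn r hlenr hrpw]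
      congr 1
      · -- head entry
        have : (t :: rest).filter (fun u => u.1 == t.1) = t :: g := by
          rw [List.filter_cons, hsplit, List.filter_append, hfiltg, hfiltr]
          simp
        rw [this]; simp
      · -- tail entries
        refine List.map_congr_left (fun v hv => ?_)
        have hvne : (t.1 == v) = false := by
          refine beq_eq_false_iff_ne.mpr ?_
          intro he; exact hnotmem (he ▸ hv)
        have hgnil : g.filter (fun u => u.1 == v) = [] := by
          refine List.filter_eq_nil_iff.mpr (fun u hu => ?_)
          rw [hg u hu]; rw [hvne]; simp
        have : (t :: rest).filter (fun u => u.1 == v) = r.filter (fun u => u.1 == v) := by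
          rw [List.filter_cons, hsplit, List.filter_append, hgnil]
          simp [hvne]
        rw [this]

lemma pvAlt_eq (flat : List (String × String × String)) :
    (PySem.Dict.ofList (pvGroups (PySem.List.sorted flat (fun t => t.1) false))).items
      = (PySem.List.sorted (PySem.Set.ofList (flat.map (fun t => t.1))) (fun v => v) false).map
          (fun v => (v, pvGroup flat v)) := by
  set s := PySem.List.sorted flat (fun t => t.1) false with hsdef
  have hsp : s.Pairwise (fun a b => a.1 ≤ b.1) := PySem.List.sorted_pairwise flat (fun t => t.1)
  have hsperm : s.Perm flat := PySem.List.sorted_perm flat (fun t => t.1) false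
  rw [pvGroups_eq s.length s (le_refl _) hsp]
  have hfilt : (PySem.Set.ofList (s.map (fun t => t.1))).map
        (fun v => (v, (s.filter (fun t => t.1 == v)).map (fun t => t.2)))
      = (PySem.Set.ofList (s.map (fun t => t.1))).map (fun v => (v, pvGroup flat v)) := by
    refine List.map_congr_left (fun v _ => ?_)
    rw [hsdef, pvFilter_sorted flat v]
    rfl
  rw [hfilt]
  have hKpw : (PySem.Set.ofList (s.map (fun t => t.1))).Pairwise (· < ·) := by
    have h1 : (s.map (fun t => t.1)).Pairwise (· ≤ ·) := List.pairwise_map.mpr hsp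
    have h2 : (PySem.Set.ofList (s.map (fun t => t.1))).Pairwise (· ≤ ·) :=
      h1.sublist (pvOfList_sublist _)
    have h3 : (PySem.Set.ofList (s.map (fun t => t.1))).Pairwise (· ≠ ·) :=
      PySem.Set.nodup_ofList _
    exact (h2.and h3).imp (fun h => lt_of_le_of_ne h.1 h.2)
  have hK : PySem.List.sorted (PySem.Set.ofList (flat.map (fun t => t.1))) (fun v => v) false
      = PySem.Set.ofList (s.map (fun t => t.1)) := by
    refine PySem.List.sorted_eq_of_perm_of_pairwise_lt _ _ _ ?_ hKpw
    refine (List.perm_ext_iff_of_nodup (PySem.Set.nodup_ofList _) (PySem.Set.nodup_ofList _)).mpr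
      (fun v => ?_)
    rw [PySem.Set.mem_ofList, PySem.Set.mem_ofList]
    exact (hsperm.map (fun t => t.1)).mem_iff
  rw [hK]
  have hnodupL : (((PySem.Set.ofList (s.map (fun t => t.1))).map
      (fun v => (v, pvGroup flat v))).map (fun p => p.1)).Nodup := by
    rw [List.map_map]
    simp only [List.Nodup, List.pairwise_map]
    exact (PySem.Set.nodup_ofList _).imp (fun h => h)
  have := PySem.Dict.items_foldl_insert_fresh
    ((PySem.Set.ofList (s.map (fun t => t.1))).map (fun v => (v, pvGroup flat v)))
    (fun p => p.1) (fun p => p.2) PySem.Dict.empty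
    (fun a _ => by simp) hnodupL
  simpa using this

lemma pvAB_eq (lista_artisti : List (List (String × String))) :
    crea_tabella_artisti lista_artisti = crea_tabella_artisti_alt lista_artisti := by
  show (PySem.Dict.ofList (PySem.List.sorted (lista_artisti.foldl _ PySem.Dict.empty).items (fun p => p.1) false)).items = _
  rw [pvFoldA, pvMain, ← pvAlt_eq]
  rfl

-- ===== VERDICT (by name: the statement is the Claim_ definition above) =====
theorem crea_tabella_artisti_spec : Claim_equal_crea_tabella_artisti := by
  intro lista_artisti _ _
  unfold Spec_crea_tabella_artisti
  exact pvAB_eq lista_artisti
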